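-- pv_equiv track=rewrite | github.com/FelipeAscencio/Backtracking_LP_Resolution | ReadyToRun/aproximacion2.py | sol_Greedy2
-- ===== SOURCE A (Python) =====
-- def sol_Greedy2(maestros, num_grupos):
--     maestros_ordenados2 = sorted(maestros, key=lambda x: x[1], reverse=True)
--     resultado2 = [([], 0)] * num_grupos
--     ida = True
--     grupo = 0
--     for guerrero in maestros_ordenados2:
--         guerreros, sumatoria = resultado2[grupo]
--         resultado2[grupo] = (guerreros + [guerrero[0]], sumatoria + guerrero[1])
--         if ida:
--             grupo += 1
--             if grupo == num_grupos:
--                 grupo = num_grupos - 1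
--                 ida = False
--         else:
--             grupo -= 1
--             if grupo == -1:
--                 grupo = 0
--                 ida = True
--     return resultado2
-- ===== SOURCE B (Python) =====
-- def _chunks(l, n):
--     if not l:
--         return []
--     return [l[:n]] + _chunks(l[n:], n)
--
-- def sol_Greedy2(maestros, num_grupos):
--     ordenados = sorted(maestros, key=lambda x: x[1], reverse=True)
--     filas = _chunks(ordenados, num_grupos)
--     resultado = []
--     for g in range(num_grupos):
--         col = []
--         for j, fila in enumerate(filas):
--             p = g if j % 2 == 0 else num_grupos - 1 - g
--             if p < len(fila):
--                 col.append(fila[p])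
--         resultado.append(([nombre for nombre, _ in col], sum(peso for _, peso in col)))
--     return resultado
-- ===== Notes on version B (the rewrite author's own statement) =====
-- stated objective: alternative
-- what changed: Replaces A's single pass with a mutable group array and a direction-flag/bouncing-index state machine by a staged chunk-and-transpose: the sorted list is split into rows of size num_grupos and each group's (names, sum) pair is built independently by gathering its column across the rows (mirrored position on odd rows).
import Mathlib
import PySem

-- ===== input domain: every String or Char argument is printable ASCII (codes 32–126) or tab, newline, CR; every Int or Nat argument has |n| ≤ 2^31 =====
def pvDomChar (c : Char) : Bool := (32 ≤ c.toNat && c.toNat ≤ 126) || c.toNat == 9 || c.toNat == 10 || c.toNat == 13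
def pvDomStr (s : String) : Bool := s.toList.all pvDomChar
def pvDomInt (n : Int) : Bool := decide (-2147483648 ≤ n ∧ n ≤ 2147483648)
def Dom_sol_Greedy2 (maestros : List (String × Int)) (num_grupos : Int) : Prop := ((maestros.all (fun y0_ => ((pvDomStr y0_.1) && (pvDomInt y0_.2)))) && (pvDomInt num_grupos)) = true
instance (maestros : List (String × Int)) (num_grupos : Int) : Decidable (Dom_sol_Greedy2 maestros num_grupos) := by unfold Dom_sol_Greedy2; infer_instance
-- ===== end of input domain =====

-- B replaces A's one-pass direction-flag/bouncing-index state machine over a mutable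
-- group array by a staged chunk-and-transpose: split the sorted list into rows of size
-- num_grupos and build each group independently from its (odd-row-mirrored) column.

-- ===== PORT A =====
-- one loop step of A: state = (resultado2, ida, grupo)
def stepA_sol (n : Int) (st : List (List String × Int) × Bool × Int) (g : String × Int) :
    List (List String × Int) × Bool × Int :=
  let res := st.1
  let grupo := st.2.2
  -- resultado2[grupo]: in range on every admitted input (Pre_ excludes the IndexError cases)
  let gs := (PySem.List.pyGet? res grupo).getD ([], 0)
  let res' := PySem.List.pySetD res grupo (gs.1 ++ [g.1], gs.2 + g.2)
  if st.2.1 then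
    if grupo + 1 = n then (res', false, n - 1) else (res', true, grupo + 1)
  else
    if grupo - 1 = -1 then (res', true, 0) else (res', false, grupo - 1)

def sol_Greedy2 (maestros : List (String × Int)) (num_grupos : Int) : List (List String × Int) :=
  let ordenados := PySem.List.sorted maestros (fun x => x.2) true
  let init := PySem.List.pyRepeat [(([] : List String), (0 : Int))] num_grupos
  (ordenados.foldl (stepA_sol num_grupos) (init, true, 0)).1

-- ===== PORT B =====
-- _chunks(l, n): recursive slicing into rows of size n; the fuel argument (called with
-- l.length, enough for every num_grupos ≥ 1 admitted by Pre_) only makes the recursion total.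
def chunksB (fuel : Nat) (l : List (String × Int)) (n : Int) : List (List (String × Int)) :=
  match fuel with
  | 0 => []
  | f + 1 =>
      if l = [] then []
      else PySem.List.slice l none (some n) :: chunksB f (PySem.List.slice l (some n) none) n

-- the inner loop: gather group g's column across the enumerated rows
def colB (n : Int) (filas : List (List (String × Int))) (g : Int) : List (String × Int) :=
  (PySem.List.enumerate filas 0).foldl
    (fun col p =>
      let pos := if PySem.Int.mod p.1 2 = 0 then g else n - 1 - g
      if pos < (p.2.length : Int) then col ++ [(PySem.List.pyGet? p.2 pos).getD ("", 0)] else col)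
    []

def sol_Greedy2_alt (maestros : List (String × Int)) (num_grupos : Int) : List (List String × Int) :=
  let ordenados := PySem.List.sorted maestros (fun x => x.2) true
  let filas := chunksB ordenados.length ordenados num_grupos
  (PySem.List.pyRange 0 num_grupos 1).map (fun g =>
    let col := colB num_grupos filas g
    (col.map (fun x => x.1), (col.map (fun x => x.2)).sum))

-- ===== PRECONDITION & SPEC =====
-- Pre_ excludes exactly the inputs on which the Python A raises: a non-empty list with
-- num_grupos < 1 (resultado2 is empty there, so resultado2[0] raises IndexError).
def Pre_sol_Greedy2 (maestros : List (String × Int)) (num_grupos : Int) : Prop :=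
  maestros = [] ∨ 1 ≤ num_grupos
instance (maestros : List (String × Int)) (num_grupos : Int) : Decidable (Pre_sol_Greedy2 maestros num_grupos) := by unfold Pre_sol_Greedy2; infer_instance
def pvWitness_sol_Greedy2 : (List (String × Int)) × Int := ([("a", 3), ("b", 1), ("c", 2)], 2)

def Spec_sol_Greedy2 (maestros : List (String × Int)) (num_grupos : Int) (out : List (List String × Int)) : Prop := out = sol_Greedy2_alt maestros num_grupos
instance (maestros : List (String × Int)) (num_grupos : Int) (out : List (List String × Int)) : Decidable (Spec_sol_Greedy2 maestros num_grupos out) := by unfold Spec_sol_Greedy2; infer_instance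

-- ===== CLAIM (what is proved, stated in full; the proofs are below) =====
def Claim_equal_sol_Greedy2 : Prop := ∀ (maestros : List (String × Int)) (num_grupos : Int), Dom_sol_Greedy2 maestros num_grupos → Pre_sol_Greedy2 maestros num_grupos → Spec_sol_Greedy2 maestros num_grupos (sol_Greedy2 maestros num_grupos)

-- ===== LEMMAS AND PROOFS =====

-- A's (ida, grupo) state after i items, in closed form
def posf (n i : Int) : Int :=
  let r := PySem.Int.mod i (2 * n)
  if r < n then r else 2 * n - 1 - r

-- B's row position of group g in row j
def rowPos (n j g : Int) : Int := if PySem.Int.mod j 2 = 0 then g else n - 1 - g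

-- the items assigned to group g, in processing order
def itemsFor (n g : Int) (ps : List (Int × (String × Int))) : List (String × Int) :=
  (ps.filter (fun p => decide (posf n p.1 = g))).map (fun p => p.2)

-- A's loop step rewritten as an update at the closed-form index (proof intermediate)
def updStep (n : Int) (res : List (List String × Int)) (p : Int × (String × Int)) :
    List (List String × Int) :=
  let g := posf n p.1
  let gs := (PySem.List.pyGet? res g).getD ([], 0)
  PySem.List.pySetD res g (gs.1 ++ [p.2.1], gs.2 + p.2.2)

def pack (v : List String × Int) (items : List (String × Int)) : List String × Int :=
  (v.1 ++ items.map (fun p => p.1), v.2 + (items.map (fun p => p.2)).sum)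

lemma mod_succ_period (n i : Int) (hn : 1 ≤ n) (_hi : 0 ≤ i) :
    PySem.Int.mod (i + 1) (2 * n) =
      if PySem.Int.mod i (2 * n) = 2 * n - 1 then 0 else PySem.Int.mod i (2 * n) + 1 := by
  have h2n : (0 : Int) < 2 * n := by omega
  rw [PySem.Int.mod_eq_emod_of_pos h2n, PySem.Int.mod_eq_emod_of_pos h2n]
  have h0 : 0 ≤ i % (2 * n) := Int.emod_nonneg i (by omega)
  have h1 : i % (2 * n) < 2 * n := Int.emod_lt_of_pos i h2n
  have hrepr : i + 1 = (i % (2 * n) + 1) + (2 * n) * (i / (2 * n)) := by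
    have := Int.emod_add_mul_ediv i (2 * n); omega
  rw [hrepr, Int.add_mul_emod_self_left]
  by_cases hr : i % (2 * n) = 2 * n - 1
  · simp [hr, show 2 * n - 1 + 1 = 2 * n by ring]
  · rw [if_neg hr, Int.emod_eq_of_lt (by omega) (by omega)]

lemma step_state (n i : Int) (hn : 1 ≤ n) (_hi : 0 ≤ i)
    (res : List (List String × Int)) (x : String × Int) :
    stepA_sol n (res, decide (PySem.Int.mod i (2 * n) < n), posf n i) x
      = (updStep n res (i, x), decide (PySem.Int.mod (i + 1) (2 * n) < n), posf n (i + 1)) := by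
  have h2n : (0 : Int) < 2 * n := by omega
  have h0 : 0 ≤ PySem.Int.mod i (2 * n) := PySem.Int.mod_nonneg i h2n
  have h1 : PySem.Int.mod i (2 * n) < 2 * n := PySem.Int.mod_lt i h2n
  have hsucc := mod_succ_period n i hn _hi
  by_cases hc : PySem.Int.mod i (2 * n) < n
  · rw [if_neg (by omega : ¬ PySem.Int.mod i (2 * n) = 2 * n - 1)] at hsucc
    by_cases hb : PySem.Int.mod i (2 * n) + 1 = n
    · simp only [stepA_sol, updStep, posf, decide_eq_true_eq, if_pos hc, hsucc, hb]
      rw [if_pos trivial]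
      simp only [Prod.mk.injEq]
      refine ⟨?_, ?_, ?_⟩ <;> first | trivial | omega | simp
    · simp only [stepA_sol, updStep, posf, decide_eq_true_eq, if_pos hc, if_neg hb,
        Prod.mk.injEq, hsucc]
      exact ⟨trivial, (decide_eq_true (show PySem.Int.mod i (2 * n) + 1 < n by omega)).symm,
        by rw [if_pos (show PySem.Int.mod i (2 * n) + 1 < n by omega)]⟩
  · by_cases hb : 2 * n - 1 - PySem.Int.mod i (2 * n) - 1 = -1
    · rw [if_pos (by omega : PySem.Int.mod i (2 * n) = 2 * n - 1)] at hsucc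
      simp only [stepA_sol, updStep, posf, decide_eq_true_eq, if_neg hc, if_pos hb,
        Prod.mk.injEq, hsucc]
      exact ⟨trivial, (decide_eq_true (show (0 : Int) < n by omega)).symm,
        by rw [if_pos (show (0 : Int) < n by omega)]⟩
    · rw [if_neg (by omega : ¬ PySem.Int.mod i (2 * n) = 2 * n - 1)] at hsucc
      simp only [stepA_sol, updStep, posf, decide_eq_true_eq, if_neg hc, if_neg hb,
        Prod.mk.injEq, hsucc]
      exact ⟨trivial, (decide_eq_false (show ¬ PySem.Int.mod i (2 * n) + 1 < n by omega)).symm,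
        by rw [if_neg (show ¬ PySem.Int.mod i (2 * n) + 1 < n by omega)]; omega⟩

lemma loop_eq (n : Int) (hn : 1 ≤ n) :
    ∀ (l : List (String × Int)) (i : Int), 0 ≤ i →
      ∀ (res : List (List String × Int)),
        (l.foldl (stepA_sol n) (res, decide (PySem.Int.mod i (2 * n) < n), posf n i)).1
          = (PySem.List.enumerate l i).foldl (updStep n) res := by
  intro l
  induction l with
  | nil => intro i _ res; simp [PySem.List.enumerate]
  | cons x xs ih =>
    intro i hi res
    rw [PySem.List.enumerate_cons, List.foldl_cons, List.foldl_cons,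
      step_state n i hn hi res x]
    exact ih (i + 1) (by omega) (updStep n res (i, x))

lemma init_state (n : Int) (hn : 1 ≤ n) :
    (true, (0 : Int)) = (decide (PySem.Int.mod 0 (2 * n) < n), posf n 0) := by
  have h2n : (0 : Int) < 2 * n := by omega
  have h0 : PySem.Int.mod 0 (2 * n) = 0 := by
    rw [PySem.Int.mod_eq_emod_of_pos h2n]; simp
  rw [posf, h0]
  simp [show (0 : Int) < n by omega]

lemma posf_bounds (n i : Int) (hn : 1 ≤ n) (hi : 0 ≤ i) : 0 ≤ posf n i ∧ posf n i < n := by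
  have h2n : (0 : Int) < 2 * n := by omega
  have h0 := PySem.Int.mod_nonneg i h2n
  have h1 := PySem.Int.mod_lt i h2n
  simp only [posf]
  split_ifs <;> omega

lemma fold_length (n : Int) (ps : List (Int × (String × Int))) :
    ∀ (res : List (List String × Int)), (ps.foldl (updStep n) res).length = res.length := by
  induction ps with
  | nil => intro res; rfl
  | cons p ps ih =>
    intro res
    rw [List.foldl_cons, ih]
    simp [updStep, PySem.List.length_pySetD]

lemma fold_getElem (n : Int) (hn : 1 ≤ n) :
    ∀ (ps : List (Int × (String × Int))), (∀ p ∈ ps, 0 ≤ p.1) →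
    ∀ (res : List (List String × Int)), res.length = n.toNat →
    ∀ (k : Nat) (hk : k < res.length),
      (ps.foldl (updStep n) res)[k]'(by rw [fold_length]; exact hk)
        = pack res[k] (itemsFor n (k : Int) ps) := by
  intro ps
  induction ps with
  | nil => intro _ res _ k hk; simp [pack, itemsFor]
  | cons p ps ih =>
    intro hall res hres k hk
    have hp0 : 0 ≤ p.1 := hall p List.mem_cons_self
    obtain ⟨hg0, hgn⟩ := posf_bounds n p.1 hn hp0
    have hin : posf n p.1 < (res.length : Int) := by omega
    have hmlt : (posf n p.1).toNat < res.length := by omega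
    have hset : updStep n res p = res.set (posf n p.1).toNat
        ((res[(posf n p.1).toNat]'hmlt).1 ++ [p.2.1],
         (res[(posf n p.1).toNat]'hmlt).2 + p.2.2) := by
      simp only [updStep]
      rw [PySem.List.pyGet?_eq_some_getElem res hg0 hin, PySem.List.pySetD_of_nonneg res _ hg0]
      rfl
    simp only [List.foldl_cons, hset]
    rw [ih (fun q hq => hall q (List.mem_cons_of_mem p hq)) _ (by simpa using hres) k
      (by simpa using hk)]
    have hitems : itemsFor n (k : Int) (p :: ps)
        = if posf n p.1 = (k : Int) then p.2 :: itemsFor n (k : Int) ps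
          else itemsFor n (k : Int) ps := by
      unfold itemsFor
      rw [List.filter_cons]
      by_cases h : posf n p.1 = (k : Int)
      · simp [h]
      · simp [h]
    rw [hitems]
    by_cases heq : posf n p.1 = (k : Int)
    · have hkk : (posf n p.1).toNat = k := by omega
      rw [if_pos heq, List.getElem_set, if_pos hkk]
      simp [pack, hkk, List.append_assoc, add_assoc]
    · have hkk : (posf n p.1).toNat ≠ k := by omega
      rw [if_neg heq, List.getElem_set, if_neg hkk]

lemma itemsIdx (c : List (String × Int)) :
    ∀ (s t : Int),
      ((PySem.List.enumerate c s).filter (fun p => decide (p.1 = t))).map (fun p => p.2)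
        = if s ≤ t ∧ t < s + (c.length : Int)
          then [(PySem.List.pyGet? c (t - s)).getD ("", 0)] else [] := by
  induction c with
  | nil =>
    intro s t
    rw [if_neg (by simp only [List.length_nil]; omega)]
    simp [PySem.List.enumerate]
  | cons x c ih =>
    intro s t
    rw [PySem.List.enumerate_cons, List.filter_cons]
    by_cases h : s = t
    · subst h
      rw [if_pos (by simp), List.map_cons, ih (s + 1) s, if_neg (by omega)]
      rw [if_pos ⟨le_refl s, by simp only [List.length_cons]; omega⟩]
      rw [show s - s = (0 : Int) by ring, PySem.List.pyGet?_zero_cons]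
      rfl
    · rw [if_neg (by simpa using h), ih (s + 1) t]
      by_cases h2 : s + 1 ≤ t ∧ t < s + 1 + (c.length : Int)
      · rw [if_pos h2, if_pos ⟨by omega, by simp only [List.length_cons]; omega⟩]
        rw [PySem.List.pyGet?_of_nonneg c (show (0 : Int) ≤ t - (s + 1) by omega),
          PySem.List.pyGet?_of_nonneg (x :: c) (show (0 : Int) ≤ t - s by omega)]
        rw [show (t - s).toNat = (t - (s + 1)).toNat + 1 by omega, List.getElem?_cons_succ]
      · rw [if_neg h2, if_neg (by simp only [List.length_cons]; omega)]

lemma rowPos_bounds (n j g : Int) (hn : 1 ≤ n) (hg : 0 ≤ g) (hgn : g < n) :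
    0 ≤ rowPos n j g ∧ rowPos n j g < n := by
  unfold rowPos; split_ifs <;> omega

lemma posf_row (n j p g : Int) (hn : 1 ≤ n) (hj : 0 ≤ j) (hp : 0 ≤ p) (hpn : p < n)
    (hg : 0 ≤ g) (hgn : g < n) :
    (posf n (j * n + p) = g) ↔ p = rowPos n j g := by
  have h2n : (0 : Int) < 2 * n := by omega
  have h2 : (0 : Int) < 2 := by omega
  unfold posf rowPos
  rw [PySem.Int.mod_eq_emod_of_pos h2]
  rcases Int.emod_two_eq j with he | ho
  · obtain ⟨k, hk⟩ := Int.dvd_of_emod_eq_zero he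
    have hmod : PySem.Int.mod (j * n + p) (2 * n) = p := by
      rw [PySem.Int.mod_eq_emod_of_pos h2n,
        show j * n + p = p + 2 * n * k by rw [hk]; ring,
        Int.add_mul_emod_self_left, Int.emod_eq_of_lt hp (by omega)]
    rw [hmod, if_pos hpn, if_pos he]
  · have hk : j = 2 * (j / 2) + 1 := by omega
    have hmod : PySem.Int.mod (j * n + p) (2 * n) = n + p := by
      rw [PySem.Int.mod_eq_emod_of_pos h2n,
        show j * n + p = (n + p) + 2 * n * (j / 2) by rw [mul_comm 2 n]; nlinarith [hk],
        Int.add_mul_emod_self_left, Int.emod_eq_of_lt (by omega) (by omega)]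
    rw [hmod, if_neg (by omega), if_neg (by omega)]
    omega

lemma itemsFor_append (n g : Int) (a b : List (Int × (String × Int))) :
    itemsFor n g (a ++ b) = itemsFor n g a ++ itemsFor n g b := by
  unfold itemsFor
  rw [List.filter_append, List.map_append]

lemma row_items (n j : Int) (hn : 1 ≤ n) (hj : 0 ≤ j) (c : List (String × Int))
    (hc : (c.length : Int) ≤ n) (g : Int) (hg : 0 ≤ g) (hgn : g < n) :
    itemsFor n g (PySem.List.enumerate c (j * n))
      = if rowPos n j g < (c.length : Int)
        then [(PySem.List.pyGet? c (rowPos n j g)).getD ("", 0)] else [] := by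
  obtain ⟨hr0, hrn⟩ := rowPos_bounds n j g hn hg hgn
  unfold itemsFor
  have hcong : (PySem.List.enumerate c (j * n)).filter (fun p => decide (posf n p.1 = g))
      = (PySem.List.enumerate c (j * n)).filter
          (fun p => decide (p.1 = j * n + rowPos n j g)) := by
    apply List.filter_congr
    intro p hp
    rw [PySem.List.mem_enumerate_iff] at hp
    obtain ⟨k, hkl, rfl⟩ := hp
    have hkn : (k : Int) < n := by omega
    rw [decide_eq_decide]
    rw [posf_row n j (k : Int) g hn hj (by omega) hkn hg hgn]
    omega
  rw [hcong, itemsIdx c (j * n) (j * n + rowPos n j g),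
    show j * n + rowPos n j g - j * n = rowPos n j g by ring]
  by_cases hlt : rowPos n j g < (c.length : Int)
  · rw [if_pos ⟨by omega, by omega⟩, if_pos hlt]
  · rw [if_neg (by omega), if_neg hlt]

lemma col_chunks (n : Int) (hn : 1 ≤ n) (g : Int) (hg : 0 ≤ g) (hgn : g < n) :
    ∀ (fuel : Nat) (l : List (String × Int)), l.length ≤ fuel → ∀ (j : Int), 0 ≤ j →
    ∀ (acc : List (String × Int)),
      (PySem.List.enumerate (chunksB fuel l n) j).foldl
        (fun col p =>
          let pos := if PySem.Int.mod p.1 2 = 0 then g else n - 1 - g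
          if pos < (p.2.length : Int) then col ++ [(PySem.List.pyGet? p.2 pos).getD ("", 0)]
          else col)
        acc
      = acc ++ itemsFor n g (PySem.List.enumerate l (j * n)) := by
  intro fuel
  induction fuel with
  | zero =>
    intro l hl j hj acc
    have hnil : l = [] := List.eq_nil_of_length_eq_zero (by omega)
    subst hnil
    simp [chunksB, itemsFor, PySem.List.enumerate]
  | succ f ih =>
    intro l hl j hj acc
    by_cases hnil : l = []
    · subst hnil
      simp [chunksB, itemsFor, PySem.List.enumerate]
    · have hcB : chunksB (f + 1) l n
          = l.take n.toNat :: chunksB f (l.drop n.toNat) n := by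
        rw [show chunksB (f + 1) l n
            = if l = [] then []
              else PySem.List.slice l none (some n)
                :: chunksB f (PySem.List.slice l (some n) none) n from rfl,
          if_neg hnil, PySem.List.slice_to l (by omega), PySem.List.slice_from l (by omega)]
      have hclen : (List.length (l.take n.toNat) : Int) ≤ n := by
        have := List.length_take_le n.toNat l
        omega
      have hrow := row_items n j hn hj (l.take n.toNat) hclen g hg hgn
      rw [hcB, PySem.List.enumerate_cons, List.foldl_cons,
        ih (l.drop n.toNat) (by simp only [List.length_drop]; omega) (j + 1) (by omega)]
      conv_rhs => rw [← List.take_append_drop n.toNat l]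
      rw [PySem.List.enumerate_append, itemsFor_append, hrow, ← List.append_assoc]
      congr 1
      · dsimp only
        simp only [rowPos] at *
        split_ifs <;> simp
      · by_cases hsh : l.drop n.toNat = []
        · rw [hsh]
          simp [itemsFor, PySem.List.enumerate]
        · have hlen : ((l.take n.toNat).length : Int) = n := by
            have h1 : n.toNat ≤ l.length := by
              by_contra hcon
              exact hsh (List.drop_eq_nil_of_le (by omega))
            rw [List.length_take]
            omega
          rw [hlen, show (j + 1) * n = j * n + n by ring]

lemma main_eq (maestros : List (String × Int)) (n : Int) (hn : 1 ≤ n) :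
    sol_Greedy2 maestros n = sol_Greedy2_alt maestros n := by
  unfold sol_Greedy2 sol_Greedy2_alt
  dsimp only
  have hA : (List.foldl (stepA_sol n)
        (PySem.List.pyRepeat [(([] : List String), (0 : Int))] n, true, 0)
        (PySem.List.sorted maestros (fun x => x.2) true)).1
      = (PySem.List.enumerate (PySem.List.sorted maestros (fun x => x.2) true) 0).foldl
          (updStep n) (List.replicate n.toNat ([], 0)) := by
    rw [PySem.List.pyRepeat_singleton]
    have h0 := init_state n hn
    rw [show ((List.replicate n.toNat (([] : List String), (0 : Int)), true, (0 : Int)))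
        = (List.replicate n.toNat (([] : List String), (0 : Int)),
           decide (PySem.Int.mod 0 (2 * n) < n), posf n 0) from by rw [← h0]]
    exact loop_eq n hn _ 0 le_rfl _
  rw [hA]
  have hall : ∀ p ∈ PySem.List.enumerate (PySem.List.sorted maestros (fun x => x.2) true) 0,
      0 ≤ p.1 := by
    intro p hp
    rw [PySem.List.mem_enumerate_iff] at hp
    obtain ⟨k, _, rfl⟩ := hp
    simp
  apply List.ext_getElem
  · rw [fold_length]
    simp [PySem.List.length_pyRange_one]
  · intro k h1 h2
    have hkres : k < (List.replicate n.toNat (([] : List String), (0 : Int))).length := by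
      rw [fold_length] at h1; exact h1
    have hkn : (k : Int) < n := by
      simp [PySem.List.length_pyRange_one] at h2
      omega
    rw [fold_getElem n hn _ hall _ (by simp) k hkres, List.getElem_map,
      PySem.List.getElem_pyRange_one]
    have hcol : colB n (chunksB (PySem.List.sorted maestros (fun x => x.2) true).length
          (PySem.List.sorted maestros (fun x => x.2) true) n) (0 + (k : Int))
        = itemsFor n (0 + (k : Int))
            (PySem.List.enumerate (PySem.List.sorted maestros (fun x => x.2) true) 0) := by
      unfold colB
      have := col_chunks n hn (0 + (k : Int)) (by omega) (by omega)
        (PySem.List.sorted maestros (fun x => x.2) true).length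
        (PySem.List.sorted maestros (fun x => x.2) true) le_rfl 0 le_rfl []
      rw [show (0 : Int) * n = 0 by ring] at this
      simpa using this
    rw [hcol, List.getElem_replicate]
    simp [pack]

-- ===== VERDICT (by name: the statement is the Claim_ definition above) =====
theorem sol_Greedy2_spec : Claim_equal_sol_Greedy2 := by
  intro maestros n _ hpre
  unfold Spec_sol_Greedy2
  by_cases hn : 1 ≤ n
  · exact main_eq maestros n hn
  · rcases hpre with h | h
    · subst h
      have hA : sol_Greedy2 [] n = [] := by
        simp [sol_Greedy2, PySem.List.pyRepeat_singleton, PySem.List.sorted,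
          Int.toNat_of_nonpos (by omega : n ≤ 0)]
      have hB : sol_Greedy2_alt [] n = [] := by
        simp [sol_Greedy2_alt, PySem.List.pyRange_one_eq_nil (by omega : n ≤ 0)]
      rw [hA, hB]
    · omega
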